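-- pv_equiv track=rewrite | github.com/igorvanloo/Project-Euler-Explained | Finished Problems/pe00816 - Shortest distance between points.py | pointsGen
-- ===== SOURCE A (Python) =====
-- def pointsGen(n):
--     s0 = 290797
--     points = []
--     for x in range(2*n - 1):
--         s1 = ((s0*s0) % 50515093)
--         if x % 2 == 0:
--             P = (s0, s1)
--             points.append(P)
--         s0 = s1
--     return points
-- ===== SOURCE B (Python) =====
-- M = 50515093          # = 5807 * 8699
-- LAM = 25250294        # multiplicative order of the seed modulo M
--
-- def pointsGen(n):
--     # Closed form: the k-th pseudorandom state equals the seed raised to 2**k mod M,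
--     # and the exponent may be reduced mod LAM (the seed's multiplicative order).
--     # Each point is computed independently from its index; no recurrence state is carried.
--     points = []
--     for i in range(n):
--         a = pow(290797, pow(2, 2 * i, LAM), M)
--         points.append((a, a * a % M))
--     return points
-- ===== Notes on version B (the rewrite author's own statement) =====
-- stated objective: alternative
-- what changed: A carries the recurrence state s -> s*s mod 50515093 through one interleaved loop; B computes each point independently by the number-theoretic closed form s_k = 290797^(2^k mod 25250294) mod 50515093 (25250294 is the multiplicative order of 290797), using modular exponentiation per index instead of any carried state.
import Mathlib
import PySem

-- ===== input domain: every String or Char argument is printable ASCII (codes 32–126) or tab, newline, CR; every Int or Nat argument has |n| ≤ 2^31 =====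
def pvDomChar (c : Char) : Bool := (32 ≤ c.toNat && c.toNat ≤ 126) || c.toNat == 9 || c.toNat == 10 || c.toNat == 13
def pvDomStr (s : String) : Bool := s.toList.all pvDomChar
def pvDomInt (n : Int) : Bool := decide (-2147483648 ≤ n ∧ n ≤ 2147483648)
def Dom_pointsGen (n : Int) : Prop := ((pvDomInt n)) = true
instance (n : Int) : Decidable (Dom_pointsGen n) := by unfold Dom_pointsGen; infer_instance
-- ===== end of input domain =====

-- B replaces A's carried recurrence state by a per-index number-theoretic closed form
-- s_k = 290797^(2^k mod 25250294) mod 50515093 (alternative algorithm, similar cost).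

-- ===== PORT A =====
def pointsGen (n : Int) : List (Int × Int) :=
  let r := (PySem.List.pyRange 0 (2 * n - 1) 1).foldl
    (fun (st : Int × List (Int × Int)) x =>
      let s1 := PySem.Int.mod (st.1 * st.1) 50515093
      let pts := if PySem.Int.mod x 2 == 0 then st.2 ++ [(st.1, s1)] else st.2
      (s1, pts))
    (290797, [])
  r.2

-- ===== PORT B =====
-- powMod b e m = Python's pow(b, e, m): square-and-multiply, structural on a fuel
-- that starts at e (ample: the recursion halves e each step)
def powModAux : Nat → Nat → Nat → Nat → Nat
  | 0, _, _, m => 1 % m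
  | fuel+1, b, e, m =>
    if e = 0 then 1 % m
    else
      let r := powModAux fuel ((b * b) % m) (e / 2) m
      if e % 2 = 1 then (r * b) % m else r

def powMod (b e m : Nat) : Nat := powModAux e b e m

def pointsGen_alt (n : Int) : List (Int × Int) :=
  (PySem.List.pyRange 0 n 1).foldl
    (fun (pts : List (Int × Int)) i =>
      -- i ranges over range(n), hence 0 ≤ i: i.toNat is exact here
      let a : Int := Int.ofNat (powMod 290797 (powMod 2 (2 * i.toNat) 25250294) 50515093)
      pts ++ [(a, PySem.Int.mod (a * a) 50515093)])
    []

-- ===== PRECONDITION & SPEC =====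
def Spec_pointsGen (n : Int) (out : List (Int × Int)) : Prop := out = pointsGen_alt n
instance (n : Int) (out : List (Int × Int)) : Decidable (Spec_pointsGen n out) := by unfold Spec_pointsGen; infer_instance

-- ===== CLAIM =====
def Claim_equal_pointsGen : Prop := ∀ (n : Int), Dom_pointsGen n → Spec_pointsGen n (pointsGen n)

-- ===== LEMMAS AND PROOFS =====
def pvNxt (s : Int) : Int := PySem.Int.mod (s * s) 50515093

def pvIter : Nat → Int → Int
  | 0, s => s
  | k+1, s => pvIter k (pvNxt s)

def pvSeq : Int → Nat → List Int
  | _, 0 => []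
  | s, k+1 => s :: pvSeq (pvNxt s) k

def pairsB : List Int → List (Int × Int)
  | a :: b :: rest => (a, b) :: pairsB rest
  | _ => []

theorem powModAux_correct : ∀ (fuel : Nat) (e b m : Nat), e ≤ fuel →
    powModAux fuel b e m = b ^ e % m := by
  intro fuel
  induction fuel with
  | zero =>
    intro e b m he
    have h0 : e = 0 := Nat.le_zero.mp he
    simp [powModAux, h0]
  | succ fuel ih =>
    intro e b m he
    rw [powModAux]
    by_cases h : e = 0
    · simp [h]
    · have hlt : e / 2 < e := Nat.div_lt_self (Nat.pos_of_ne_zero h) one_lt_two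
      simp only [h, if_false]
      rw [ih (e / 2) _ m (by omega)]
      have hbb : ((b * b) % m) ^ (e / 2) % m = (b * b) ^ (e / 2) % m := by
        rw [← Nat.pow_mod]
      have hpow : (b * b) ^ (e / 2) = b ^ (2 * (e / 2)) := by
        rw [two_mul, pow_add, ← mul_pow]
      by_cases h2 : e % 2 = 1
      · simp only [h2, if_true]
        rw [hbb, hpow, Nat.mul_mod, Nat.mod_mod_of_dvd _ (dvd_refl m), ← Nat.mul_mod]
        have : b ^ (2 * (e / 2)) * b = b ^ e := by
          rw [← pow_succ]
          congr 1
          omega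
        rw [this]
      · have h0 : e % 2 = 0 := by omega
        simp only [h2, if_false]
        rw [hbb, hpow]
        congr 2
        omega

theorem powMod_correct (b e m : Nat) : powMod b e m = b ^ e % m :=
  powModAux_correct e e b m (le_refl e)

-- the multiplicative order fact, checked through powMod
theorem pvOrder : (290797 : Nat) ^ 25250294 % 50515093 = 1 := by
  rw [← powMod_correct 290797 25250294 50515093]
  decide

theorem pvReduce (e : Nat) :
    (290797 : Nat) ^ e % 50515093 = (290797 : Nat) ^ (e % 25250294) % 50515093 := by
  have h : (290797 : Nat) ^ 25250294 ≡ 1 [MOD 50515093] := by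
    unfold Nat.ModEq
    rw [pvOrder]
  have hsplit : e = 25250294 * (e / 25250294) + e % 25250294 := (Nat.div_add_mod e 25250294).symm
  calc (290797 : Nat) ^ e % 50515093
      = ((290797 : Nat) ^ 25250294) ^ (e / 25250294) * 290797 ^ (e % 25250294) % 50515093 := by
        rw [← pow_mul, ← pow_add, ← hsplit]
    _ = (290797 : Nat) ^ (e % 25250294) % 50515093 := by
        have := ((h.pow (e / 25250294)).mul_right ((290797 : Nat) ^ (e % 25250294)))
        simpa using this

-- closed form of the iterated squaring map (Int side)
theorem pvIter_closed : ∀ (k : Nat) (a : Nat), a < 50515093 →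
    pvIter k (Int.ofNat a) = Int.ofNat (a ^ (2 ^ k) % 50515093) := by
  intro k
  induction k with
  | zero => intro a ha; simp [pvIter, pow_one, Nat.mod_eq_of_lt ha]
  | succ k ih =>
    intro a ha
    have hnxt : pvNxt (Int.ofNat a) = Int.ofNat ((a * a) % 50515093) := by
      unfold pvNxt
      rw [PySem.Int.mod_eq_emod_of_pos (by norm_num)]
      simp only [Int.ofNat_eq_natCast]
      push_cast
      rfl
    rw [show pvIter (k+1) (Int.ofNat a) = pvIter k (pvNxt (Int.ofNat a)) from rfl, hnxt,
        ih _ (Nat.mod_lt _ (by norm_num))]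
    congr 1
    rw [← Nat.pow_mod]
    congr 1
    rw [show a * a = a ^ 2 by ring, ← pow_mul]
    congr 1
    omega

theorem pvIter_lt : ∀ (k : Nat), ∃ a : Nat, a < 50515093 ∧ pvIter k (290797 : Int) = Int.ofNat a := by
  intro k
  refine ⟨290797 ^ (2 ^ k) % 50515093, Nat.mod_lt _ (by norm_num), ?_⟩
  exact pvIter_closed k 290797 (by norm_num)

theorem pvIter_succ_right : ∀ (k : Nat) (s : Int), pvIter (k + 1) s = pvNxt (pvIter k s) := by
  intro k
  induction k with
  | zero => intro s; rfl
  | succ k ih => intro s; exact ih (pvNxt s)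

-- pairing the flat state sequence = indexing even/odd iterates
theorem pvPairs : ∀ (k : Nat) (s : Int),
    pairsB (pvSeq s (2 * k)) = (List.range k).map (fun i => (pvIter (2 * i) s, pvIter (2 * i + 1) s)) := by
  intro k
  induction k with
  | zero => intro s; simp [pvSeq, pairsB]
  | succ k ih =>
    intro s
    rw [show 2 * (k + 1) = (2 * k) + 1 + 1 by omega]
    show pairsB (s :: pvNxt s :: pvSeq (pvNxt (pvNxt s)) (2 * k)) = _
    rw [show pairsB (s :: pvNxt s :: pvSeq (pvNxt (pvNxt s)) (2 * k))
          = (s, pvNxt s) :: pairsB (pvSeq (pvNxt (pvNxt s)) (2 * k)) from rfl,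
        ih (pvNxt (pvNxt s)), List.range_succ_eq_map]
    simp only [List.map_cons, List.map_map]
    congr 1

-- A's fold (from the seed proof): result = pairsB of the flat state sequence
theorem pvFoldA : ∀ (m : Nat) (j s : Int) (acc : List (Int × Int)),
    j % 2 = 0 →
    (PySem.List.pyRange j (j + (2 * m + 1)) 1).foldl
      (fun (st : Int × List (Int × Int)) x =>
        let s1 := PySem.Int.mod (st.1 * st.1) 50515093
        let pts := if PySem.Int.mod x 2 == 0 then st.2 ++ [(st.1, s1)] else st.2
        (s1, pts))
      (s, acc)
    = (pvIter (2 * m + 1) s, acc ++ pairsB (pvSeq s (2 * m + 2))) := by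
  intro m
  induction m with
  | zero =>
    intro j s acc hj
    rw [show j + (2 * ((0:Nat):Int) + 1) = j + 1 by norm_num, PySem.List.pyRange_one_singleton]
    have hmj : PySem.Int.mod j 2 = 0 := by
      rw [PySem.Int.mod_eq_emod_of_pos (by norm_num : (0:Int) < 2)]; exact hj
    have e1 : (fun (st : Int × List (Int × Int)) x =>
        let s1 := PySem.Int.mod (st.1 * st.1) 50515093
        let pts := if PySem.Int.mod x 2 == 0 then st.2 ++ [(st.1, s1)] else st.2
        (s1, pts)) (s, acc) j = (pvNxt s, acc ++ [(s, pvNxt s)]) := by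
      simp only [pvNxt, hmj]; rfl
    simp only [List.foldl_cons, List.foldl_nil, e1]
    simp [pvIter, pvSeq, pairsB]
  | succ m ih =>
    intro j s acc hj
    rw [show j + (2 * (((m+1:Nat)):Int) + 1) = j + (2 * (m:Int) + 3) by push_cast; ring]
    rw [PySem.List.pyRange_one_cons (by omega)]
    rw [show j + (2 * (m:Int) + 3) = (j + 1) + (2 * m + 2) by ring]
    rw [PySem.List.pyRange_one_cons (by omega)]
    have hmj : PySem.Int.mod j 2 = 0 := by
      rw [PySem.Int.mod_eq_emod_of_pos (by norm_num : (0:Int) < 2)]; exact hj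
    have hmj1 : PySem.Int.mod (j + 1) 2 = 1 := by
      rw [PySem.Int.mod_eq_emod_of_pos (by norm_num : (0:Int) < 2)]; omega
    have e1 : (let s1 := PySem.Int.mod ((s, acc).1 * (s, acc).1) 50515093
        let pts := if PySem.Int.mod j 2 == 0 then (s, acc).2 ++ [((s, acc).1, s1)] else (s, acc).2
        ((s1, pts) : Int × List (Int × Int))) = (pvNxt s, acc ++ [(s, pvNxt s)]) := by
      simp only [pvNxt, hmj]; rfl
    have e2 : (let q := (pvNxt s, acc ++ [(s, pvNxt s)])
        let s1 := PySem.Int.mod (q.1 * q.1) 50515093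
        let pts := if PySem.Int.mod (j + 1) 2 == 0 then q.2 ++ [(q.1, s1)] else q.2
        ((s1, pts) : Int × List (Int × Int))) = (pvNxt (pvNxt s), acc ++ [(s, pvNxt s)]) := by
      simp only [pvNxt, hmj1]; rfl
    rw [List.foldl_cons, e1, List.foldl_cons, e2,
        show j + 1 + (2 * (m:Int) + 2) = j + 2 + (2 * m + 1) by ring,
        show j + 1 + 1 = j + 2 by ring,
        ih (j + 2) (pvNxt (pvNxt s)) (acc ++ [(s, pvNxt s)]) (by omega)]
    rw [show 2 * (m + 1) + 1 = (2 * m + 1) + 1 + 1 from by omega,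
        show 2 * (m + 1) + 2 = (2 * m + 2) + 1 + 1 from by omega]
    simp [pvIter, pvSeq, pairsB, List.append_assoc]

-- generic: folding with one append per element is a map
theorem pvFoldAppend (f : Int → Int × Int) : ∀ (l : List Int) (acc : List (Int × Int)),
    l.foldl (fun pts i => pts ++ [f i]) acc = acc ++ l.map f := by
  intro l
  induction l with
  | nil => intro acc; simp
  | cons x xs ih => intro acc; simp [ih, List.append_assoc]

-- B's element at nonnegative index j equals the pair of iterates
theorem pvElemB (j : Nat) :
    ((fun i : Int =>
      let a : Int := Int.ofNat (powMod 290797 (powMod 2 (2 * i.toNat) 25250294) 50515093)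
      ((a, PySem.Int.mod (a * a) 50515093) : Int × Int)) (Int.ofNat j))
    = (pvIter (2 * j) (290797 : Int), pvIter (2 * j + 1) (290797 : Int)) := by
  have htoNat : (Int.ofNat j).toNat = j := rfl
  have ha : powMod 290797 (powMod 2 (2 * j) 25250294) 50515093
      = 290797 ^ (2 ^ (2 * j)) % 50515093 := by
    rw [powMod_correct 2 (2 * j) 25250294, powMod_correct 290797 _ 50515093, ← pvReduce]
  have hclosed := pvIter_closed (2 * j) 290797 (by norm_num)
  have hfirst : Int.ofNat (powMod 290797 (powMod 2 (2 * j) 25250294) 50515093)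
      = pvIter (2 * j) (290797 : Int) := by
    rw [ha]; exact hclosed.symm
  simp only [htoNat, hfirst]
  congr 1
  rw [pvIter_succ_right]
  obtain ⟨a, hlt, heq⟩ := pvIter_lt (2 * j)
  rw [heq]
  rfl

-- ===== VERDICT =====
theorem pointsGen_spec : Claim_equal_pointsGen := by
  intro n _
  unfold Spec_pointsGen pointsGen pointsGen_alt
  by_cases hn : n ≤ 0
  · rw [PySem.List.pyRange_one_eq_nil (by omega), PySem.List.pyRange_one_eq_nil (by omega)]
    simp
  · rw [not_le] at hn
    obtain ⟨m, hm⟩ : ∃ m : Nat, n = (m : Int) + 1 := ⟨(n - 1).toNat, by omega⟩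
    have hA : 2 * n - 1 = 0 + (2 * (m : Int) + 1) := by omega
    rw [hA, pvFoldA m 0 290797 [] (by decide)]
    rw [show n = ((m + 1 : Nat) : Int) by push_cast; omega, PySem.List.pyRange_zero_nat,
        pvFoldAppend]
    simp only [List.nil_append]
    rw [show 2 * m + 2 = 2 * (m + 1) by omega, pvPairs, List.map_map]
    congr 1
    funext j
    exact (pvElemB j).symm
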